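-- pv_equiv track=rewrite | github.com/dxl0632/data_incubator | split_name.py | appendLastName
-- ===== SOURCE A (Python) =====
-- def appendLastName(inputNameList):
--     numWordsList=[x.strip().count(' ')+1 for x in inputNameList]
--
--     currIndividual=0
--     LastNames=[]
--     for x  in numWordsList:
--         if x>1:
--             LastNames.append( inputNameList[currIndividual].split(" ")[-1])
--         currIndividual+=1
--     #print LastNames
--
--     currIndividual=0
--     outputNameList=[]
--     for x  in numWordsList:
--         if x==1:
--             if len(LastNames)>0:
--                 thisName=inputNameList[currIndividual]+" "+LastNames[0]
--             else:
--                 thisName = inputNameList[currIndividual]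
--         else:
--             thisName=inputNameList[currIndividual]
--             del LastNames[0]
--         #print thisName
--         outputNameList+=[thisName]
--         currIndividual+=1
--     return outputNameList
-- ===== SOURCE B (Python) =====
-- def appendLastName(inputNameList):
--     # single reverse pass: carry the next multi-word name's last name as scalar state
--     nextLast = None
--     out = []
--     for name in reversed(inputNameList):
--         if name.strip().count(' ') + 1 > 1:
--             nextLast = name.split(' ')[-1]
--             out.append(name)
--         else:
--             out.append(name if nextLast is None else name + ' ' + nextLast)
--     out.reverse()
--     return out
-- ===== Notes on version B (the rewrite author's own statement) =====
-- stated objective: simpler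
-- what changed: Replaces A's two forward passes and the LastNames queue by a single right-to-left pass carrying one scalar 'nextLast' state variable.
import Mathlib
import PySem

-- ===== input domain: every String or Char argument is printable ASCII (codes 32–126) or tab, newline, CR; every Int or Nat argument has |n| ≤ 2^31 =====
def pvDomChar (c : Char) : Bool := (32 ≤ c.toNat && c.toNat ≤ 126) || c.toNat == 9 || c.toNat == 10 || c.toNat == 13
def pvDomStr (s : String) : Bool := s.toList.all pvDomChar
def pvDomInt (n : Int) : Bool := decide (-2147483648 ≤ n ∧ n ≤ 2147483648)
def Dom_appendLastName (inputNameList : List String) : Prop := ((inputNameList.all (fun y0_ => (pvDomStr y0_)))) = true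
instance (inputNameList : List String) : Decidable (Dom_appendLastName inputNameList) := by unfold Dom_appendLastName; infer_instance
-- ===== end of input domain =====

-- B replaces A's two forward passes and LastNames queue by one reverse pass with a scalar state (objective: simpler).

-- ===== PORT A =====
-- x.strip().count(' ') + 1
def pvNumw (x : String) : Int := (PySem.Str.count (PySem.Str.strip x) " " : Int) + 1

-- inputNameList[i].split(" ")[-1]
def pvLastWord (n : String) : String :=
  (PySem.List.pyGet? ((PySem.Str.split? n " ").getD []) (-1)).getD ""

-- first loop: for x in numWordsList: if x>1: LastNames.append(input[curr].split(" ")[-1]); curr+=1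
def pvLoop1 (input : List String) : List Int → Nat → List String → List String
  | [], _, acc => acc
  | x :: xs, i, acc =>
      pvLoop1 input xs (i + 1)
        (if x > 1 then acc ++ [pvLastWord ((input[i]?).getD "")] else acc)

-- second loop
def pvLoop2 (input : List String) : List Int → Nat → List String → List String → List String
  | [], _, _, out => out
  | x :: xs, i, lns, out =>
      if x == 1 then
        let thisName :=
          if lns.length > 0 then (input[i]?).getD "" ++ " " ++ (lns.head?).getD ""
          else (input[i]?).getD ""
        pvLoop2 input xs (i + 1) lns (out ++ [thisName])
      else
        pvLoop2 input xs (i + 1) (lns.drop 1) (out ++ [(input[i]?).getD ""])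

def appendLastName (inputNameList : List String) : List String :=
  let numWordsList := inputNameList.map pvNumw
  let lastNames := pvLoop1 inputNameList numWordsList 0 []
  pvLoop2 inputNameList numWordsList 0 lastNames []

-- ===== PORT B =====
-- one step of the reversed-order loop; state = (nextLast, out-so-far)
def pvBStep (st : Option String × List String) (name : String) : Option String × List String :=
  if pvNumw name > 1 then
    (some (pvLastWord name), st.2 ++ [name])
  else
    (st.1, st.2 ++ [match st.1 with
                    | some l => name ++ " " ++ l
                    | none => name])

def appendLastName_alt (inputNameList : List String) : List String :=
  ((inputNameList.reverse.foldl pvBStep (none, [])).2).reverse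

-- ===== PRECONDITION & SPEC =====
def Spec_appendLastName (inputNameList : List String) (out : List String) : Prop := out = appendLastName_alt inputNameList
instance (inputNameList : List String) (out : List String) : Decidable (Spec_appendLastName inputNameList out) := by unfold Spec_appendLastName; infer_instance

-- ===== CLAIM (what is proved, stated in full; the proofs are below) =====
def Claim_equal_appendLastName : Prop := ∀ (inputNameList : List String), Dom_appendLastName inputNameList → Spec_appendLastName inputNameList (appendLastName inputNameList)

-- ===== LEMMAS AND PROOFS =====

-- reference recursion from the right: (next multi-word last name, output)
def pvSpecRec : List String → Option String × List String
  | [] => (none, [])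
  | n :: rest =>
      let p := pvSpecRec rest
      if pvNumw n > 1 then (some (pvLastWord n), n :: p.2)
      else (p.1, (match p.1 with | some l => n ++ " " ++ l | none => n) :: p.2)

def pvLastNames (l : List String) : List String :=
  l.filterMap (fun n => if pvNumw n > 1 then some (pvLastWord n) else none)

theorem pvSpecRec_fst (l : List String) : (pvSpecRec l).1 = (pvLastNames l).head? := by
  induction l with
  | nil => rfl
  | cons n rest ih =>
      simp only [pvSpecRec, pvLastNames, List.filterMap_cons]
      split_ifs with h <;> simp_all [pvLastNames]

theorem pvLoop1_eq (input : List String) (s : List String) (i : Nat) (acc : List String)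
    (hs : input.drop i = s) :
    pvLoop1 input (s.map pvNumw) i acc = acc ++ pvLastNames s := by
  induction s generalizing i acc with
  | nil => simp [pvLoop1, pvLastNames]
  | cons n rest ih =>
      have hget : input[i]? = some n := by
        rw [← List.head?_drop, hs]; rfl
      have hrest : input.drop (i + 1) = rest := by
        have h1 := congrArg (List.drop 1) hs
        simpa [List.drop_drop, Nat.add_comm] using h1
      simp only [List.map_cons, pvLoop1, hget, Option.getD_some]
      rw [ih (i + 1) _ hrest]
      by_cases h : pvNumw n > 1
      · simp [h, pvLastNames]
      · simp [h, pvLastNames]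

theorem pvLoop2_eq (input : List String) (s : List String) (i : Nat) (out : List String)
    (hs : input.drop i = s) :
    pvLoop2 input (s.map pvNumw) i (pvLastNames s) out = out ++ (pvSpecRec s).2 := by
  induction s generalizing i out with
  | nil => simp [pvLoop2, pvSpecRec]
  | cons n rest ih =>
      have hget : input[i]? = some n := by
        rw [← List.head?_drop, hs]; rfl
      have hrest : input.drop (i + 1) = rest := by
        have h1 := congrArg (List.drop 1) hs
        simpa [List.drop_drop, Nat.add_comm] using h1
      by_cases h : pvNumw n > 1
      · -- multi-word: x ≠ 1 since x > 1
        have hx : ¬ (pvNumw n == 1) = true := by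
          simp only [beq_iff_eq]; omega
        have hln : pvLastNames (n :: rest) = pvLastWord n :: pvLastNames rest := by
          simp [pvLastNames, h]
        simp only [List.map_cons, pvLoop2, hln, hget, Option.getD_some]
        rw [if_neg hx]
        simp only [List.drop_one, List.tail_cons]
        rw [ih (i + 1) _ hrest]
        simp [pvSpecRec, if_pos h]
      · have hx1 : pvNumw n = 1 := by
          have h0 : (0:Int) ≤ (PySem.Str.count (PySem.Str.strip n) " " : Int) :=
            Int.natCast_nonneg _
          unfold pvNumw at h ⊢; omega
        have hx : (pvNumw n == 1) = true := by simp [hx1]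
        have hln : pvLastNames (n :: rest) = pvLastNames rest := by
          simp [pvLastNames, h]
        simp only [List.map_cons, pvLoop2, hln, hget, Option.getD_some]
        rw [if_pos hx]
        rw [ih (i + 1) _ hrest]
        have hmatch :
            (if (pvLastNames rest).length > 0 then n ++ " " ++ ((pvLastNames rest).head?).getD "" else n)
            = (match (pvSpecRec rest).1 with | some l => n ++ " " ++ l | none => n) := by
          rw [pvSpecRec_fst]
          cases hh : (pvLastNames rest) with
          | nil => simp
          | cons a t => simp
        simp only [pvSpecRec, if_neg h]
        rw [← hmatch]
        simp

theorem appendLastName_eq_spec (l : List String) : appendLastName l = (pvSpecRec l).2 := by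
  show pvLoop2 l (List.map pvNumw l) 0 (pvLoop1 l (List.map pvNumw l) 0 []) [] = (pvSpecRec l).2
  rw [pvLoop1_eq l l 0 [] (by simp), List.nil_append, pvLoop2_eq l l 0 [] (by simp),
    List.nil_append]

theorem pvBFold (l : List String) (out0 : List String) :
    l.reverse.foldl pvBStep (none, out0) = ((pvSpecRec l).1, out0 ++ (pvSpecRec l).2.reverse) := by
  induction l generalizing out0 with
  | nil => simp [pvSpecRec]
  | cons n rest ih =>
      rw [List.reverse_cons, List.foldl_append, ih out0]
      simp only [List.foldl_cons, List.foldl_nil, pvBStep, pvSpecRec]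
      by_cases h : pvNumw n > 1
      · simp [h]
      · simp [h]

theorem appendLastName_alt_eq_spec (l : List String) : appendLastName_alt l = (pvSpecRec l).2 := by
  unfold appendLastName_alt
  rw [pvBFold l []]
  simp

-- ===== VERDICT (by name: the statement is the Claim_ definition above) =====
theorem appendLastName_spec : Claim_equal_appendLastName := by
  intro l _
  unfold Spec_appendLastName
  rw [appendLastName_eq_spec, appendLastName_alt_eq_spec]
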